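-- pv_equiv track=rewrite | github.com/Jasper-Ty/j3sg | static/misc/wordle_cmdline_solver.py | evaluate
-- ===== SOURCE A (Python) =====
-- W_LEN = 5
--
-- GREEN = 2
--
-- YELLOW = 1
--
-- BLACK = 0
--
-- def evaluate(word, hidden):
--     ev_w = [0] * W_LEN
--     ev_h = [0] * W_LEN
--     for i in range(W_LEN):
--         if word[i] == hidden[i]:
--             ev_w[i] = GREEN
--             ev_h[i] = GREEN
--     for i in range(W_LEN):
--         for j in range(W_LEN):
--             if ev_w[i] == BLACK and ev_h[j] == BLACK:
--                 if word[i] == hidden[j]: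
--                     ev_w[i] = YELLOW
--                     ev_h[j] = YELLOW
--     return ev_w
-- ===== SOURCE B (Python) =====
-- W_LEN = 5
--
-- GREEN = 2
--
-- YELLOW = 1
--
-- BLACK = 0
--
-- def evaluate(word, hidden):
--     # greens first
--     res = [GREEN if word[i] == hidden[i] else BLACK for i in range(W_LEN)]
--     # count hidden letters at non-green positions
--     counts = {}
--     for i in range(W_LEN):
--         if res[i] == BLACK:
--             counts[hidden[i]] = counts.get(hidden[i], 0) + 1
--     # greedy yellows left to right
--     for i in range(W_LEN):
--         if res[i] == BLACK and counts.get(word[i], 0) > 0: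
--             res[i] = YELLOW
--             counts[word[i]] -= 1
--     return res
-- ===== Notes on version B (the rewrite author's own statement) =====
-- stated objective: idiomatic
-- what changed: A marks yellows with a quadratic double loop over per-position flag arrays for both guess and hidden word; B computes greens in one comprehension, builds a dictionary counting the hidden letters at non-green positions, and assigns yellows in a single left-to-right pass that decrements the counts.
import Mathlib
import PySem

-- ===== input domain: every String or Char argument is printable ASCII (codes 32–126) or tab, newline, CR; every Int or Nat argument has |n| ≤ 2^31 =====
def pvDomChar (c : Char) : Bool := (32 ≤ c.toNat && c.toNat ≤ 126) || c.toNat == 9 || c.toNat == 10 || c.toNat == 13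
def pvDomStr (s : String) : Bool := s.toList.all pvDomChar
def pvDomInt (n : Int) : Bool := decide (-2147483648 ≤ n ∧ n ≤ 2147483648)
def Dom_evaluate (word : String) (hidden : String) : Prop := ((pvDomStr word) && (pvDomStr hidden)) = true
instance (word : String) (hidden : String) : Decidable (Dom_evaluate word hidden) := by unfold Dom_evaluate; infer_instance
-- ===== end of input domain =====

-- B replaces A's quadratic flag-matrix pass with a single letter-count dictionary pass (alternative decomposition, same cost at W_LEN = 5).

-- ===== PORT A =====
-- word[i] as a Char: total form of Str.pyGet?, exact whenever the index is in range (guaranteed by Pre_evaluate for indices 0..4)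
def chAt (s : String) (i : Int) : Char := (PySem.Str.pyGet? s i).getD ' '

-- A's first loop (greens) over the state (ev_w, ev_h)
def grnA (c h : Int → Char) (L : List Int) (s : List Int × List Int) : List Int × List Int :=
  L.foldl (fun s i =>
    if c i = h i then (PySem.List.pySetD s.1 i 2, PySem.List.pySetD s.2 i 2) else s) s

-- A's inner j-loop of the second (yellow) loop
def innA (c h : Int → Char) (i : Int) (L : List Int) (t : List Int × List Int) : List Int × List Int :=
  L.foldl (fun t j =>
    if PySem.List.pyGetD t.1 i 0 = 0 ∧ PySem.List.pyGetD t.2 j 0 = 0 ∧ c i = h j then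
      (PySem.List.pySetD t.1 i 1, PySem.List.pySetD t.2 j 1)
    else t) t

def evaluate (word : String) (hidden : String) : List Int :=
  let c := chAt word
  let h := chAt hidden
  let s1 := grnA c h (PySem.List.pyRange 0 5 1) (List.replicate 5 0, List.replicate 5 0)
  let s2 := (PySem.List.pyRange 0 5 1).foldl (fun s i => innA c h i (PySem.List.pyRange 0 5 1) s) s1
  s2.1

-- ===== PORT B =====
-- B's counting loop: counts[hidden[i]] = counts.get(hidden[i], 0) + 1 at non-green positions
def cntB (h : Int → Char) (res : List Int) (L : List Int) (d : PySem.Dict Char Int) : PySem.Dict Char Int :=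
  L.foldl (fun d i =>
    if PySem.List.pyGetD res i 0 = 0 then d.insert (h i) (d.getD (h i) 0 + 1) else d) d

-- B's yellow loop over the state (res, counts)
def ylwB (c : Int → Char) (L : List Int) (t : List Int × PySem.Dict Char Int) :
    List Int × PySem.Dict Char Int :=
  L.foldl (fun t i =>
    if PySem.List.pyGetD t.1 i 0 = 0 ∧ t.2.getD (c i) 0 > 0 then
      (PySem.List.pySetD t.1 i 1, t.2.insert (c i) (t.2.getD (c i) 0 - 1))
    else t) t

def evaluate_alt (word : String) (hidden : String) : List Int :=
  let c := chAt word
  let h := chAt hidden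
  let res := (PySem.List.pyRange 0 5 1).map (fun i => if c i = h i then (2 : Int) else 0)
  let counts := cntB h res (PySem.List.pyRange 0 5 1) PySem.Dict.empty
  (ylwB c (PySem.List.pyRange 0 5 1) (res, counts)).1

-- ===== PRECONDITION & SPEC =====
-- Pre_ excludes exactly the inputs on which Python A raises IndexError: a word or hidden string shorter than 5.
def Pre_evaluate (word : String) (hidden : String) : Prop :=
  5 ≤ PySem.Str.len word ∧ 5 ≤ PySem.Str.len hidden
instance (word : String) (hidden : String) : Decidable (Pre_evaluate word hidden) := by
  unfold Pre_evaluate; infer_instance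
def pvWitness_evaluate : String × String := ("crane", "slate")

def Spec_evaluate (word : String) (hidden : String) (out : List Int) : Prop := out = evaluate_alt word hidden
instance (word : String) (hidden : String) (out : List Int) : Decidable (Spec_evaluate word hidden out) := by
  unfold Spec_evaluate; infer_instance

-- ===== CLAIM (what is proved, stated in full; the proofs are below) =====
def Claim_equal_evaluate : Prop := ∀ (word : String) (hidden : String), Dom_evaluate word hidden → Pre_evaluate word hidden → Spec_evaluate word hidden (evaluate word hidden)

-- ===== LEMMAS AND PROOFS =====

-- Proof-only shadows of the loops: outer index stays an Int, inner positions become Nats.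

def R5 : List Nat := [0, 1, 2, 3, 4]

-- chars of hidden at the still-black positions of evH listed by L
def bcP (h : Int → Char) (L : List Nat) (evH : List Int) : List Char :=
  (L.filter (fun (j : Nat) => evH[j]?.getD 0 == 0)).map (fun (j : Nat) => h (j : Int))

def stepA (c h : Int → Char) (i : Int) (t : List Int × List Int) (j : Nat) : List Int × List Int :=
  if PySem.List.pyGetD t.1 i 0 = 0 ∧ t.2[j]?.getD 0 = 0 ∧ c i = h j then
    (PySem.List.pySetD t.1 i 1, t.2.set j 1)
  else t

def innP (c h : Int → Char) (i : Int) (L : List Nat) (t : List Int × List Int) : List Int × List Int :=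
  L.foldl (stepA c h i) t

def outPA (c h : Int → Char) (L : List Int) (s : List Int × List Int) : List Int × List Int :=
  L.foldl (fun s i => innP c h i R5 s) s

def stepB (c : Int → Char) (t : List Int × PySem.Dict Char Int) (i : Int) :
    List Int × PySem.Dict Char Int :=
  if PySem.List.pyGetD t.1 i 0 = 0 ∧ t.2.getD (c i) 0 > 0 then
    (PySem.List.pySetD t.1 i 1, t.2.insert (c i) (t.2.getD (c i) 0 - 1))
  else t

def outPB (c : Int → Char) (L : List Int) (t : List Int × PySem.Dict Char Int) :
    List Int × PySem.Dict Char Int :=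
  L.foldl (stepB c) t

def cntP (h : Int → Char) (res : List Int) (L : List Nat) (d : PySem.Dict Char Int) : PySem.Dict Char Int :=
  L.foldl (fun d (j : Nat) => if res[j]?.getD 0 = 0 then d.insert (h (j : Int)) (d.getD (h (j : Int)) 0 + 1) else d) d

def G (c h : Int → Char) : List Int :=
  [if c 0 = h 0 then 2 else 0, if c 1 = h 1 then 2 else 0, if c 2 = h 2 then 2 else 0,
   if c 3 = h 3 then 2 else 0, if c 4 = h 4 then 2 else 0]

lemma pyRangeMap : PySem.List.pyRange 0 5 1 = R5.map (Nat.cast : Nat → Int) := by decide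

lemma pyRangeLit : PySem.List.pyRange 0 5 1 = ([0, 1, 2, 3, 4] : List Int) := by decide

lemma gset_self (l : List Int) {i : Nat} (hi : i < l.length) (v : Int) :
    (l.set i v)[i]?.getD 0 = v := by
  simp [List.getElem?_set_self hi]

lemma gset_ne (l : List Int) {i m : Nat} (hne : i ≠ m) (v : Int) :
    (l.set i v)[m]?.getD 0 = l[m]?.getD 0 := by
  simp [List.getElem?_set_ne hne]

lemma pg_ps_self (l : List Int) {i : Int} (h0 : 0 ≤ i) (hl : i < (l.length : Int)) (v : Int) :
    PySem.List.pyGetD (PySem.List.pySetD l i v) i 0 = v := by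
  rw [PySem.List.pySetD_of_nonneg l v h0,
      PySem.List.pyGetD_eq_getElem _ _ h0 (by simpa using hl)]
  exact List.getElem_set_self _

lemma dgetD_insert (d : PySem.Dict Char Int) (k x : Char) (v : Int) :
    (d.insert k v).getD x 0 = if x = k then v else d.getD x 0 := by
  by_cases hxk : x = k
  · simp [hxk, PySem.Dict.getD_insert_self]
  · rw [if_neg hxk]
    exact PySem.Dict.getD_insert_of_ne d v 0 hxk

lemma bcP_nil (h : Int → Char) (evH : List Int) : bcP h [] evH = [] := rfl

lemma bcP_cons_pos (h : Int → Char) {j : Nat} (L : List Nat) {evH : List Int}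
    (hbj : evH[j]?.getD 0 = 0) : bcP h (j :: L) evH = h j :: bcP h L evH := by
  simp only [bcP, List.filter_cons]
  rw [if_pos (by simp [hbj])]
  rfl

lemma bcP_cons_neg (h : Int → Char) {j : Nat} (L : List Nat) {evH : List Int}
    (hbj : ¬ evH[j]?.getD 0 = 0) : bcP h (j :: L) evH = bcP h L evH := by
  simp only [bcP, List.filter_cons]
  rw [if_neg (by simp [hbj])]

lemma bcP_congr (h : Int → Char) (L : List Nat) (evH evH' : List Int)
    (hc : ∀ j ∈ L, evH'[j]?.getD 0 = evH[j]?.getD 0) : bcP h L evH' = bcP h L evH := by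
  unfold bcP
  rw [List.filter_congr (fun j hj => by rw [hc j hj])]

lemma grn_eval (c h : Int → Char) :
    grnA c h (PySem.List.pyRange 0 5 1) (List.replicate 5 0, List.replicate 5 0) = (G c h, G c h) := by
  simp only [grnA, pyRangeLit, List.foldl_cons, List.foldl_nil, G]
  split_ifs <;> rfl

lemma resG (c h : Int → Char) :
    (PySem.List.pyRange 0 5 1).map (fun i => if c i = h i then (2 : Int) else 0) = G c h := by
  simp only [pyRangeLit, List.map_cons, List.map_nil, G]

lemma innA_innP (c h : Int → Char) (i : Int) (t : List Int × List Int) :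
    innA c h i (PySem.List.pyRange 0 5 1) t = innP c h i R5 t := by
  simp only [innA, innP, pyRangeMap, List.foldl_map, PySem.List.pyGetD_natCast,
    PySem.List.pySetD_natCast, List.getD_eq_getElem?_getD]
  rfl

lemma cntB_cntP (h : Int → Char) (res : List Int) (d : PySem.Dict Char Int) :
    cntB h res (PySem.List.pyRange 0 5 1) d = cntP h res R5 d := by
  simp only [cntB, cntP, pyRangeMap, List.foldl_map, PySem.List.pyGetD_natCast,
    List.getD_eq_getElem?_getD]

lemma ylwB_outPB (c : Int → Char) (L : List Int) (t : List Int × PySem.Dict Char Int) :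
    ylwB c L t = outPB c L t := rfl

lemma cnt_count (h : Int → Char) (res : List Int) :
    ∀ (L : List Nat) (d : PySem.Dict Char Int) (x : Char),
      (cntP h res L d).getD x 0 = d.getD x 0 + ((bcP h L res).count x : Int) := by
  intro L
  induction L with
  | nil => intro d x; simp [cntP, bcP]
  | cons j L ih =>
    intro d x
    by_cases hj : res[j]?.getD 0 = 0
    · have h1 : cntP h res (j :: L) d = cntP h res L (d.insert (h j) (d.getD (h j) 0 + 1)) := by
        simp only [cntP, List.foldl_cons]
        rw [if_pos hj]
      rw [h1, ih, dgetD_insert, bcP_cons_pos h L hj, List.count_cons]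
      by_cases hx : x = h (j : Int)
      · rw [if_pos hx, hx]
        simp
        omega
      · rw [if_neg hx]
        have hb : (h (j : Int) == x) = false := by simpa using (Ne.symm hx)
        rw [hb]
        simp
    · have h1 : cntP h res (j :: L) d = cntP h res L d := by
        simp only [cntP, List.foldl_cons]
        rw [if_neg hj]
      rw [h1, ih, bcP_cons_neg h L hj]

lemma innP_cons (c h : Int → Char) (i : Int) (j : Nat) (L : List Nat) (t : List Int × List Int) :
    innP c h i (j :: L) t = innP c h i L (stepA c h i t j) := rfl

lemma innP_id (c h : Int → Char) (i : Int) :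
    ∀ (L : List Nat) (t : List Int × List Int), PySem.List.pyGetD t.1 i 0 ≠ 0 → innP c h i L t = t := by
  intro L
  induction L with
  | nil => intro t _; rfl
  | cons j L ih =>
    intro t hi
    rw [innP_cons]
    have hst : stepA c h i t j = t := by
      unfold stepA
      rw [if_neg (fun hc => hi hc.1)]
    rw [hst]; exact ih t hi

lemma innP_len (c h : Int → Char) (i : Int) :
    ∀ (L : List Nat) (t : List Int × List Int),
      (innP c h i L t).1.length = t.1.length ∧ (innP c h i L t).2.length = t.2.length := by
  intro L
  induction L with
  | nil => intro t; exact ⟨rfl, rfl⟩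
  | cons j L ih =>
    intro t
    rw [innP_cons]
    rcases ih (stepA c h i t j) with ⟨h1, h2⟩
    rw [h1, h2]
    unfold stepA
    split_ifs <;> simp [PySem.List.length_pySetD]

lemma innP_untouched (c h : Int → Char) (i : Int) :
    ∀ (L : List Nat) (t : List Int × List Int) (m : Nat), m ∉ L →
      (innP c h i L t).2[m]?.getD 0 = t.2[m]?.getD 0 := by
  intro L
  induction L with
  | nil => intro t m _; rfl
  | cons j L ih =>
    intro t m hm
    have hmj : m ≠ j := fun he => hm (by simp [he])
    have hmL : m ∉ L := fun he => hm (by simp [he])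
    rw [innP_cons, ih _ m hmL]
    unfold stepA
    split_ifs with hc
    · exact gset_ne t.2 (Ne.symm hmj) 1
    · rfl

lemma innP_char (c h : Int → Char) (i : Int) (h0 : 0 ≤ i) (hi : i < 5) :
    ∀ (L : List Nat), L.Nodup →
    ∀ (evW evH : List Int), evW.length = 5 → PySem.List.pyGetD evW i 0 = 0 →
      (∀ j ∈ L, j < evH.length) →
      (c i ∈ bcP h L evH →
        (innP c h i L (evW, evH)).1 = PySem.List.pySetD evW i 1 ∧
        bcP h L ((innP c h i L (evW, evH)).2) = (bcP h L evH).erase (c i)) ∧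
      (c i ∉ bcP h L evH → innP c h i L (evW, evH) = (evW, evH)) := by
  intro L
  induction L with
  | nil =>
    intro _ evW evH _ _ _
    refine ⟨fun hm => absurd hm (by simp [bcP_nil]), fun _ => rfl⟩
  | cons j L ih =>
    intro hnd evW evH hlW hiW hb
    have hjlen : j < evH.length := hb j (by simp)
    have hjL : j ∉ L := (List.nodup_cons.mp hnd).1
    have hndL : L.Nodup := (List.nodup_cons.mp hnd).2
    have hbL : ∀ j' ∈ L, j' < evH.length := fun j' hj' => hb j' (by simp [hj'])
    by_cases hbj : evH[j]?.getD 0 = 0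
    · by_cases hcj : c i = h (j : Nat)
      · -- the step fires: yellow at i, consume position j
        have hst : stepA c h i (evW, evH) j = (PySem.List.pySetD evW i 1, evH.set j 1) := by
          unfold stepA
          rw [if_pos ⟨hiW, hbj, hcj⟩]
        have hres : innP c h i (j :: L) (evW, evH) = (PySem.List.pySetD evW i 1, evH.set j 1) := by
          rw [innP_cons, hst]
          exact innP_id c h i L _ (by
            have h1 : PySem.List.pyGetD (PySem.List.pySetD evW i 1) i 0 = 1 :=
              pg_ps_self evW h0 (by rw [hlW]; exact_mod_cast hi) 1
            rw [h1]; exact one_ne_zero)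
        have hmem : c i ∈ bcP h (j :: L) evH := by
          rw [bcP_cons_pos h L hbj, hcj]
          exact List.mem_cons_self
        constructor
        · intro _
          refine ⟨by rw [hres], ?_⟩
          rw [hres]
          have hLtail : bcP h L (evH.set j 1) = bcP h L evH :=
            bcP_congr h L evH _ (fun j' hj' => gset_ne evH (by rintro rfl; exact hjL hj') 1)
          have hhead : ¬ (evH.set j 1)[j]?.getD 0 = 0 := by
            rw [gset_self evH hjlen 1]; exact one_ne_zero
          have hlhs : bcP h (j :: L) (evH.set j 1) = bcP h L evH := by
            rw [bcP_cons_neg h L hhead, hLtail]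
          have hrhs : (bcP h (j :: L) evH).erase (c i) = bcP h L evH := by
            rw [bcP_cons_pos h L hbj, hcj, List.erase_cons_head]
          rw [hlhs, hrhs]
        · intro hnm; exact absurd hmem hnm
      · -- position j holds the wrong letter: the step does nothing
        have hst : stepA c h i (evW, evH) j = (evW, evH) := by
          unfold stepA
          rw [if_neg (fun hc => hcj hc.2.2)]
        have hstep : innP c h i (j :: L) (evW, evH) = innP c h i L (evW, evH) := by
          rw [innP_cons, hst]
        have hcons : bcP h (j :: L) evH = h (j : Nat) :: bcP h L evH := bcP_cons_pos h L hbj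
        have huntouched : (innP c h i L (evW, evH)).2[j]?.getD 0 = 0 := by
          rw [innP_untouched c h i L _ j hjL]; exact hbj
        rcases ih hndL evW evH hlW hiW hbL with ⟨ih1, ih2⟩
        constructor
        · intro hm
          have hmL : c i ∈ bcP h L evH := by
            rcases List.mem_cons.mp (hcons ▸ hm) with he | he
            · exact absurd he hcj
            · exact he
          rcases ih1 hmL with ⟨e1, e2⟩
          refine ⟨by rw [hstep, e1], ?_⟩
          rw [hstep, bcP_cons_pos h L huntouched, e2, hcons,
            List.erase_cons_tail (by simpa using fun he => hcj he.symm)]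
        · intro hnm
          have hnmL : c i ∉ bcP h L evH := fun hm => hnm (by rw [hcons]; exact List.mem_cons_of_mem _ hm)
          rw [hstep, ih2 hnmL]
    · -- position j is not black: filtered out on both sides
      have hst : stepA c h i (evW, evH) j = (evW, evH) := by
        unfold stepA
        rw [if_neg (fun hc => hbj hc.2.1)]
      have hstep : innP c h i (j :: L) (evW, evH) = innP c h i L (evW, evH) := by
        rw [innP_cons, hst]
      have hcons : bcP h (j :: L) evH = bcP h L evH := bcP_cons_neg h L hbj
      have huntouched : ¬ (innP c h i L (evW, evH)).2[j]?.getD 0 = 0 := by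
        rw [innP_untouched c h i L _ j hjL]; exact hbj
      rcases ih hndL evW evH hlW hiW hbL with ⟨ih1, ih2⟩
      constructor
      · intro hm
        have hmL : c i ∈ bcP h L evH := by rwa [hcons] at hm
        rcases ih1 hmL with ⟨e1, e2⟩
        refine ⟨by rw [hstep, e1], ?_⟩
        rw [hstep, bcP_cons_neg h L huntouched, e2, hcons]
      · intro hnm
        rw [hstep, ih2 (by rwa [hcons] at hnm)]

lemma mainRel (c h : Int → Char) :
    ∀ (L : List Int), (∀ i ∈ L, 0 ≤ i ∧ i < 5) →
    ∀ (evW evH : List Int) (d : PySem.Dict Char Int),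
      evW.length = 5 → evH.length = 5 →
      (∀ x : Char, d.getD x 0 = ((bcP h R5 evH).count x : Int)) →
      (outPA c h L (evW, evH)).1 = (outPB c L (evW, d)).1 := by
  intro L
  induction L with
  | nil => intro _ evW evH d _ _ _; rfl
  | cons i L ih =>
    intro hb evW evH d hlW hlH hrel
    have hi5 : 0 ≤ i ∧ i < 5 := hb i (by simp)
    have hbL : ∀ i' ∈ L, 0 ≤ i' ∧ i' < 5 := fun i' hi' => hb i' (by simp [hi'])
    have hbR5 : ∀ j ∈ R5, j < evH.length := by
      have h5 : ∀ j ∈ R5, j < 5 := by decide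
      intro j hj; rw [hlH]; exact h5 j hj
    have hA : outPA c h (i :: L) (evW, evH) = outPA c h L (innP c h i R5 (evW, evH)) := rfl
    have hBstep : outPB c (i :: L) (evW, d) = outPB c L (stepB c (evW, d) i) := rfl
    by_cases Hi : PySem.List.pyGetD evW i 0 = 0
    · by_cases Hm : c i ∈ bcP h R5 evH
      · rcases (innP_char c h i hi5.1 hi5.2 R5 (by decide) evW evH hlW Hi hbR5).1 Hm with ⟨e1, e2⟩
        have hcnt : 0 < (bcP h R5 evH).count (c i) := List.count_pos_iff.mpr Hm
        have hd : d.getD (c i) 0 > 0 := by rw [hrel]; exact_mod_cast hcnt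
        have hB : stepB c (evW, d) i
            = (PySem.List.pySetD evW i 1, d.insert (c i) (d.getD (c i) 0 - 1)) := by
          unfold stepB
          rw [if_pos ⟨Hi, hd⟩]
        have hpair : innP c h i R5 (evW, evH)
            = (PySem.List.pySetD evW i 1, (innP c h i R5 (evW, evH)).2) := by
          rw [← e1]
        rw [hA, hBstep, hB, hpair]
        apply ih hbL
        · rw [PySem.List.length_pySetD]; exact hlW
        · exact ((innP_len c h i R5 (evW, evH)).2).trans hlH
        · intro x
          rw [e2, dgetD_insert]
          by_cases hx : x = c i
          · rw [if_pos hx, hrel, hx, List.count_erase_self]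
            omega
          · rw [if_neg hx, hrel, List.count_erase_of_ne hx]
      · have he : innP c h i R5 (evW, evH) = (evW, evH) :=
          (innP_char c h i hi5.1 hi5.2 R5 (by decide) evW evH hlW Hi hbR5).2 Hm
        have hcnt0 : d.getD (c i) 0 = 0 := by
          rw [hrel, List.count_eq_zero.mpr Hm]; rfl
        have hB : stepB c (evW, d) i = (evW, d) := by
          unfold stepB
          rw [if_neg (fun hc => by rw [hcnt0] at hc; exact lt_irrefl 0 hc.2)]
        rw [hA, hBstep, he, hB]
        exact ih hbL evW evH d hlW hlH hrel
    · have he : innP c h i R5 (evW, evH) = (evW, evH) := innP_id c h i R5 _ Hi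
      have hB : stepB c (evW, d) i = (evW, d) := by
        unfold stepB
        rw [if_neg (fun hc => Hi hc.1)]
      rw [hA, hBstep, he, hB]
      exact ih hbL evW evH d hlW hlH hrel

lemma evaluate_eq_outPA (word hidden : String) :
    evaluate word hidden
      = (outPA (chAt word) (chAt hidden) (PySem.List.pyRange 0 5 1)
          (G (chAt word) (chAt hidden), G (chAt word) (chAt hidden))).1 := by
  simp only [evaluate]
  rw [grn_eval]
  simp only [innA_innP]
  rfl

lemma evaluate_alt_eq_outPB (word hidden : String) :
    evaluate_alt word hidden
      = (outPB (chAt word) (PySem.List.pyRange 0 5 1)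
          (G (chAt word) (chAt hidden),
           cntP (chAt hidden) (G (chAt word) (chAt hidden)) R5 PySem.Dict.empty)).1 := by
  simp only [evaluate_alt]
  rw [resG, cntB_cntP, ylwB_outPB]

-- ===== VERDICT (by name: the statement is the Claim_ definition above) =====
theorem evaluate_spec : Claim_equal_evaluate := by
  intro word hidden _ _
  show evaluate word hidden = evaluate_alt word hidden
  rw [evaluate_eq_outPA, evaluate_alt_eq_outPB]
  exact mainRel (chAt word) (chAt hidden) (PySem.List.pyRange 0 5 1) (by decide)
    (G (chAt word) (chAt hidden)) (G (chAt word) (chAt hidden)) _ rfl rfl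
    (fun x => by rw [cnt_count]; simp)
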